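-- pv_equiv track=rewrite | github.com/tthanh1223/Schoolwork | test.py | find_max_list
-- ===== SOURCE A (Python) =====
-- def is_ascending(nums):
--     if len(nums) == 1 or len(nums) == 2:
--         return True
--     for i in range(1,len(nums)-1):
--         if nums[i+1] - nums[i] == nums[i] - nums[i-1] and nums[i-1] < nums[i] < nums[i+1]:
--             return True
--     return False
--
-- def find_max_list(sales:list):
--     steps = []
--     result = []
--     for i in range(0,len(sales)-1):
--         steps.append(sales[i+1]-sales[i])
--         if is_ascending(steps):
--             result.append(sales[i])
--         else:
--             continue
--     return result
-- ===== SOURCE B (Python) =====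
-- def find_max_list(sales: list):
--     diffs = [b - a for a, b in zip(sales, sales[1:])]
--     L = len(diffs)
--     t = next((t for t in range(1, L - 1)
--               if diffs[t + 1] - diffs[t] == diffs[t] - diffs[t - 1]
--               and diffs[t - 1] < diffs[t] < diffs[t + 1]), None)
--     threshold = L if t is None else t + 1
--     return sales[:min(2, L)] + sales[threshold:L]
-- ===== Notes on version B (the rewrite author's own statement) =====
-- stated objective: faster
-- what changed: A rescans the whole growing difference list with is_ascending on every iteration (quadratic); B builds the difference list once, finds the first arithmetic strictly-increasing triple centre in one linear scan, and assembles the result by slicing around that threshold.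
import Mathlib
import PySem

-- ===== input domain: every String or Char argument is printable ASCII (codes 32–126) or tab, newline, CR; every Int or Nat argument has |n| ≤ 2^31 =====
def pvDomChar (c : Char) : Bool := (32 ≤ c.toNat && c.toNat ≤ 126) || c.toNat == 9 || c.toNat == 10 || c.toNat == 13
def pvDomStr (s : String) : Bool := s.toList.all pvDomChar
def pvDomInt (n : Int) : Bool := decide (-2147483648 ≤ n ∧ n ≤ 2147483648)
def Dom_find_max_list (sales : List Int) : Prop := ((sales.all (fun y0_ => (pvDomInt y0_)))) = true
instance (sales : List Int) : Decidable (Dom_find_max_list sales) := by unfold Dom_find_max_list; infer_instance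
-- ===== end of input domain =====

-- B replaces A's per-prefix rescan of the growing difference list by one difference list built
-- once, a single scan for the first arithmetic strictly-increasing triple, and slicing (faster).

-- ===== PORT A =====
-- inner loop of is_ascending: 'for i in range(t, stop): if triple at i: return True'
def ascLoop (nums : List Int) (t stop : Nat) : Bool :=
  if t < stop then
    if (nums.getD (t+1) 0 - nums.getD t 0 == nums.getD t 0 - nums.getD (t-1) 0)
        && decide (nums.getD (t-1) 0 < nums.getD t 0)
        && decide (nums.getD t 0 < nums.getD (t+1) 0)
    then true else ascLoop nums (t+1) stop
  else false
termination_by stop - t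

def is_ascending (nums : List Int) : Bool :=
  if nums.length = 1 ∨ nums.length = 2 then true
  else ascLoop nums 1 (nums.length - 1)

-- main loop of A, with the steps/result accumulators exactly as in the Python
def fmLoop (sales : List Int) (i stop : Nat) (steps result : List Int) : List Int :=
  if i < stop then
    let steps' := steps ++ [sales.getD (i+1) 0 - sales.getD i 0]
    fmLoop sales (i+1) stop steps'
      (if is_ascending steps' then result ++ [sales.getD i 0] else result)
  else result
termination_by stop - i

def find_max_list (sales : List Int) : List Int :=
  fmLoop sales 0 (sales.length - 1) [] []

-- ===== PORT B =====
-- 'next((t for t in range(t0, stop) if triple at t), None)'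
def findT (diffs : List Int) (t stop : Nat) : Option Nat :=
  if t < stop then
    if (diffs.getD (t+1) 0 - diffs.getD t 0 == diffs.getD t 0 - diffs.getD (t-1) 0)
        && decide (diffs.getD (t-1) 0 < diffs.getD t 0)
        && decide (diffs.getD t 0 < diffs.getD (t+1) 0)
    then some t
    else findT diffs (t+1) stop
  else none
termination_by stop - t

def find_max_list_alt (sales : List Int) : List Int :=
  let diffs := List.zipWith (fun a b => b - a) sales sales.tail
  let L := diffs.length
  let threshold := match findT diffs 1 (L - 1) with
    | none => L
    | some t => t + 1
  sales.take (min 2 L) ++ (sales.take L).drop threshold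

-- ===== PRECONDITION & SPEC =====
def Spec_find_max_list (sales : List Int) (out : List Int) : Prop := out = find_max_list_alt sales
instance (sales : List Int) (out : List Int) : Decidable (Spec_find_max_list sales out) := by unfold Spec_find_max_list; infer_instance

-- ===== CLAIM (what is proved, stated in full; the proofs are below) =====
def Claim_equal_find_max_list : Prop := ∀ (sales : List Int), Dom_find_max_list sales → Spec_find_max_list sales (find_max_list sales)

-- ===== LEMMAS AND PROOFS =====

-- the triple test both loops perform, as a named predicate
def condB (d : List Int) (t : Nat) : Bool := (d.getD (t+1) 0 - d.getD t 0 == d.getD t 0 - d.getD (t-1) 0) && decide (d.getD (t-1) 0 < d.getD t 0) && decide (d.getD t 0 < d.getD (t+1) 0)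

theorem ascLoop_iff (nums : List Int) (lo stop : Nat) :
    ascLoop nums lo stop = true ↔ ∃ t, lo ≤ t ∧ t < stop ∧ condB nums t = true := by
  fun_induction ascLoop nums lo stop with
  | case1 t h hc => simp only [true_iff]; exact ⟨t, le_refl _, h, hc⟩
  | case2 t h hc ih =>
      rw [ih]
      constructor
      · rintro ⟨u, h1, h2, h3⟩; exact ⟨u, Nat.le_of_succ_le h1, h2, h3⟩
      · rintro ⟨u, h1, h2, h3⟩
        rcases h1.lt_or_eq with hlt | heq
        · exact ⟨u, hlt, h2, h3⟩
        · exact absurd h3 (heq ▸ (by simpa [condB] using hc))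
  | case3 t h => simp only [Bool.false_eq_true, false_iff]; rintro ⟨u, h1, h2, _⟩; omega

theorem findT_some (d : List Int) (lo stop : Nat) :
    ∀ t, findT d lo stop = some t →
    lo ≤ t ∧ t < stop ∧ condB d t = true ∧ ∀ u, lo ≤ u → u < t → condB d u = false := by
  fun_induction findT d lo stop with
  | case1 v h hc =>
      intro t ht; injection ht with ht; subst ht
      exact ⟨le_refl _, h, hc, fun u h1 h2 => absurd h2 (by omega)⟩
  | case2 v h hc ih =>
      intro t ht
      obtain ⟨h1, h2, h3, h4⟩ := ih t ht
      refine ⟨by omega, h2, h3, fun u hu1 hu2 => ?_⟩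
      rcases hu1.lt_or_eq with hlt | heq
      · exact h4 u hlt hu2
      · subst heq; simpa [condB] using hc
  | case3 v h => intro t ht; simp at ht

theorem findT_none (d : List Int) (lo stop : Nat) (h : findT d lo stop = none) :
    ∀ u, lo ≤ u → u < stop → condB d u = false := by
  fun_induction findT d lo stop with
  | case1 v hv hc => simp at h
  | case2 v hv hc ih =>
      intro u h1 h2
      rcases h1.lt_or_eq with hlt | heq
      · exact ih h u hlt h2
      · subst heq; simpa [condB] using hc
  | case3 v hv => intro u h1 h2; omega

theorem getD_take (l : List Int) (k j : Nat) (h : j < k) :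
    (l.take k).getD j 0 = l.getD j 0 := by
  simp [List.getD, h]

theorem condB_take (d : List Int) (k t : Nat) (h : t + 1 < k) :
    condB (d.take k) t = condB d t := by
  simp only [condB, getD_take d k (t+1) h, getD_take d k t (by omega), getD_take d k (t-1) (by omega)]

def dfsOf (sales : List Int) : List Int := List.zipWith (fun a b => b - a) sales sales.tail

theorem len_dfs (sales : List Int) : (dfsOf sales).length = sales.length - 1 := by
  simp [dfsOf, List.length_zipWith]

theorem dfs_getD (sales : List Int) (i : Nat) (h : i + 1 < sales.length) :
    (dfsOf sales).getD i 0 = sales.getD (i+1) 0 - sales.getD i 0 := by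
  unfold dfsOf
  have h1 : i < (List.zipWith (fun a b => b - a) sales sales.tail).length := by
    have := len_dfs sales; unfold dfsOf at this; omega
  have h2 : i < sales.tail.length := by simp [List.length_tail]; omega
  rw [List.getD_eq_getElem _ _ h1, List.getD_eq_getElem _ _ (by omega : i < sales.length),
      List.getD_eq_getElem _ _ h, List.getElem_zipWith]
  congr 1
  rw [List.getElem_tail]

theorem asc_take (d : List Int) (j : Nat) (hj : j < d.length) :
    is_ascending (d.take (j+1)) = true ↔
      j < 2 ∨ ∃ t, 1 ≤ t ∧ t < j ∧ condB d t = true := by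
  have hlen : (d.take (j+1)).length = j + 1 := by simp; omega
  unfold is_ascending
  rw [hlen]
  by_cases h2 : j < 2
  · rw [if_pos (by omega)]; simp [h2]
  · rw [if_neg (by omega)]
    have : j + 1 - 1 = j := by omega
    rw [this, ascLoop_iff]
    constructor
    · rintro ⟨t, h1, h3, h4⟩
      exact Or.inr ⟨t, h1, h3, by rwa [condB_take d (j+1) t (by omega)] at h4⟩
    · rintro (h | ⟨t, h1, h3, h4⟩)
      · omega
      · exact ⟨t, h1, h3, by rwa [condB_take d (j+1) t (by omega)]⟩

def thrOf (d : List Int) : Nat :=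
  match findT d 1 (d.length - 1) with
  | none => d.length
  | some t => t + 1

theorem thr_ge (d : List Int) : min 2 d.length ≤ thrOf d := by
  cases hf : findT d 1 (d.length - 1) with
  | none => simp only [thrOf, hf]; omega
  | some t =>
      obtain ⟨h1, _, _, _⟩ := findT_some d 1 _ t hf
      simp only [thrOf, hf]; omega

theorem thr_le (d : List Int) : thrOf d ≤ d.length := by
  cases hf : findT d 1 (d.length - 1) with
  | none => simp only [thrOf, hf]; omega
  | some t =>
      obtain ⟨_, h2, _, _⟩ := findT_some d 1 _ t hf
      simp only [thrOf, hf]; omega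

theorem P_iff (d : List Int) (j : Nat) (hj : j < d.length) :
    is_ascending (d.take (j+1)) = true ↔ (j < 2 ∨ thrOf d ≤ j) := by
  rw [asc_take d j hj]
  constructor
  · rintro (h2 | ⟨t, h1, h3, h4⟩)
    · exact Or.inl h2
    · right
      cases hf : findT d 1 (d.length - 1) with
      | none => exact absurd h4 (by simp [findT_none d 1 _ hf t h1 (by omega)])
      | some t₀ =>
          obtain ⟨ht1, ht2, ht3, hmin⟩ := findT_some d 1 _ t₀ hf
          have : t₀ ≤ t := by
            by_contra hc
            exact absurd h4 (by simp [hmin t h1 (by omega)])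
          simp only [thrOf, hf]; omega
  · rintro (h2 | hthr)
    · exact Or.inl h2
    · right
      cases hf : findT d 1 (d.length - 1) with
      | none => simp only [thrOf, hf] at hthr; omega
      | some t₀ =>
          obtain ⟨ht1, ht2, ht3, _⟩ := findT_some d 1 _ t₀ hf
          simp only [thrOf, hf] at hthr
          exact ⟨t₀, ht1, by omega, ht3⟩

theorem bool_eq_decide (b : Bool) (P : Prop) [Decidable P] (h : b = true ↔ P) : b = decide P := by
  by_cases hp : P
  · simp [hp, h.mpr hp]
  · cases hb : b
    · simp [hp]
    · exact absurd (h.mp hb) hp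

theorem fmLoop_spec (sales : List Int) :
    ∀ n i acc, i + n = (dfsOf sales).length →
    fmLoop sales i ((dfsOf sales).length) ((dfsOf sales).take i) acc =
      acc ++ ((List.range' i n).filter
        (fun j => decide (j < 2) || decide (thrOf (dfsOf sales) ≤ j))).map
        (fun j => sales.getD j 0) := by
  intro n
  induction n with
  | zero => intro i acc hi; rw [fmLoop, if_neg (by omega)]; simp
  | succ n ih =>
      intro i acc hi
      have hiL : i < (dfsOf sales).length := by omega
      have hlen : (dfsOf sales).length = sales.length - 1 := len_dfs sales
      rw [fmLoop, if_pos hiL]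
      have hst : (dfsOf sales).take i ++ [sales.getD (i+1) 0 - sales.getD i 0]
          = (dfsOf sales).take (i+1) := by
        rw [← dfs_getD sales i (by omega), List.take_succ,
            List.getElem?_eq_getElem hiL, List.getD_eq_getElem _ _ hiL]
        rfl
      simp only [hst]
      have hasc : is_ascending ((dfsOf sales).take (i+1))
          = (decide (i < 2) || decide (thrOf (dfsOf sales) ≤ i)) := by
        rw [← Bool.decide_or]
        exact bool_eq_decide _ _ (P_iff _ i hiL)
      rw [hasc, ih (i+1) _ (by omega), List.range'_succ, List.filter_cons]
      by_cases hp : (i ≤ 1 ∨ thrOf (dfsOf sales) ≤ i)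
      · have h2 : i < 2 ∨ thrOf (dfsOf sales) ≤ i := by omega
        simp [hp, h2]
      · have h2 : ¬(i < 2 ∨ thrOf (dfsOf sales) ≤ i) := by omega
        simp [hp, h2]

theorem filter_ge_range' (thr : Nat) :
    ∀ n m, m ≤ thr → thr ≤ m + n →
    (List.range' m n).filter (fun j => decide (thr ≤ j)) = List.range' thr (m + n - thr) := by
  intro n
  induction n with
  | zero =>
      intro m h1 h2
      have hm : m + 0 - thr = 0 := by omega
      rw [hm]
      simp
  | succ n ih =>
      intro m h1 h2
      rw [List.range'_succ]
      by_cases h : thr ≤ m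
      · have hm : thr = m := by omega
        subst hm
        rw [List.filter_cons_of_pos (by simp)]
        rw [List.filter_eq_self.mpr ?_]
        · rw [show thr + (n+1) - thr = n + 1 by omega, List.range'_succ]
        · intro j hj
          simp only [List.mem_range'_1] at hj
          simp; omega
      · rw [List.filter_cons_of_neg (by simp; omega)]
        rw [ih (m+1) (by omega) (by omega)]
        congr 1
        omega

theorem map_getD_range' (sales : List Int) :
    ∀ n i, i + n ≤ sales.length →
    (List.range' i n).map (fun j => sales.getD j 0) = (sales.drop i).take n := by
  intro n
  induction n with
  | zero => intro i h; simp
  | succ n ih =>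
      intro i h
      have hi : i < sales.length := by omega
      rw [List.range'_succ, List.map_cons, ih (i+1) (by omega),
          List.getD_eq_getElem _ _ hi, List.drop_eq_getElem_cons hi]
      rfl

theorem range'_split (m L : Nat) (h : m ≤ L) :
    List.range' 0 L = List.range' 0 m ++ List.range' m (L - m) := by
  have h2 : List.range' 0 m 1 ++ List.range' (0 + 1 * m) (L - m) 1 = List.range' 0 (m + (L - m)) 1 :=
    List.range'_append
  simp only [Nat.one_mul, Nat.zero_add] at h2
  rw [show L = m + (L - m) by omega, show m + (L - m) - m = L - m by omega]
  exact h2.symm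

theorem assemble (sales : List Int) :
    ((List.range' 0 (dfsOf sales).length).filter
      (fun j => decide (j < 2) || decide (thrOf (dfsOf sales) ≤ j))).map
      (fun j => sales.getD j 0)
    = sales.take (min 2 (dfsOf sales).length)
      ++ (sales.take (dfsOf sales).length).drop (thrOf (dfsOf sales)) := by
  have hlen : (dfsOf sales).length = sales.length - 1 := len_dfs sales
  have h1 := thr_ge (dfsOf sales)
  have h2 := thr_le (dfsOf sales)
  have hm : min 2 (dfsOf sales).length ≤ (dfsOf sales).length := by omega
  rw [range'_split (min 2 (dfsOf sales).length) (dfsOf sales).length hm,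
      List.filter_append, List.map_append]
  congr 1
  · rw [List.filter_eq_self.mpr ?_]
    · rw [map_getD_range' sales (min 2 (dfsOf sales).length) 0 (by omega), List.drop_zero]
    · intro j hj
      simp only [List.mem_range'_1] at hj
      simp
      omega
  · rw [List.filter_congr (q := fun j => decide (thrOf (dfsOf sales) ≤ j)) ?_]
    · rw [filter_ge_range' (thrOf (dfsOf sales)) _ _ h1 (by omega),
          show min 2 (dfsOf sales).length + ((dfsOf sales).length - min 2 (dfsOf sales).length)
              - thrOf (dfsOf sales) = (dfsOf sales).length - thrOf (dfsOf sales) by omega,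
          map_getD_range' sales _ (thrOf (dfsOf sales)) (by omega), List.drop_take]
    · intro j hj
      simp only [List.mem_range'_1] at hj
      have : ¬ (j < 2) := by omega
      simp [this]

theorem alt_eq (sales : List Int) :
    find_max_list_alt sales
      = sales.take (min 2 (dfsOf sales).length)
        ++ (sales.take (dfsOf sales).length).drop (thrOf (dfsOf sales)) := rfl

theorem main (sales : List Int) : find_max_list sales = find_max_list_alt sales := by
  have hlen : (dfsOf sales).length = sales.length - 1 := len_dfs sales
  have h := fmLoop_spec sales ((dfsOf sales).length) 0 [] (by omega)
  rw [List.take_zero] at h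
  unfold find_max_list
  rw [← hlen, h, List.nil_append, assemble sales, alt_eq]

-- ===== VERDICT (by name: the statement is the Claim_ definition above) =====
theorem find_max_list_spec : Claim_equal_find_max_list := by
  intro sales _
  exact main sales
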